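-- pv_equiv track=rewrite | github.com/miliar/Code_Jam_Webscraper | Solutions_in_python/Problem_55/gcj2.py | money
-- ===== SOURCE A (Python) =====
-- def money(r, k, l):
--     s = 0
--     for i in range(r):
--         tmps = 0
--         tmpl = []
--         while len(l):
--             tmps += l[0]
--             if tmps > k:
--                 break
--             s += l[0]
--             tmpl.append(l[0])
--             l.pop(0)
--         l += tmpl
--
--     return str(s)
-- ===== SOURCE B (Python) =====
-- def money(r, k, l):
--     n = len(l)
--     if n == 0 or r <= 0:
--         return "0"
--
--     def ride(o):
--         # earnings and next front offset of one ride starting with group index o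
--         e = 0
--         t = 0
--         while t < n and e + l[(o + t) % n] <= k:
--             e += l[(o + t) % n]
--             t += 1
--         return e, (o + t) % n
--
--     # simulate rides until the front offset repeats (or all r rides are done)
--     seen = {}
--     o = 0
--     total = 0
--     i = 0
--     while i < r and o not in seen:
--         seen[o] = (i, total)
--         e, o = ride(o)
--         total += e
--         i += 1
--     if i < r:
--         # offset o was first reached at ride j: rides j..i-1 form a cycle
--         j, tj = seen[o]
--         c = i - j
--         q, rem = divmod(r - i, c)
--         total += q * (total - tj)
--         for _ in range(rem):
--             e, o = ride(o)
--             total += e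
--     return str(total)
-- ===== Notes on version B (the rewrite author's own statement) =====
-- stated objective: faster
-- what changed: Instead of mutating the list with pop(0)/append for every group of every ride, B represents the queue by a front offset, computes each ride's earnings by modular index scanning, and detects when the offset repeats so that the remaining rides are settled by cycle arithmetic instead of simulation.
import Mathlib
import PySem

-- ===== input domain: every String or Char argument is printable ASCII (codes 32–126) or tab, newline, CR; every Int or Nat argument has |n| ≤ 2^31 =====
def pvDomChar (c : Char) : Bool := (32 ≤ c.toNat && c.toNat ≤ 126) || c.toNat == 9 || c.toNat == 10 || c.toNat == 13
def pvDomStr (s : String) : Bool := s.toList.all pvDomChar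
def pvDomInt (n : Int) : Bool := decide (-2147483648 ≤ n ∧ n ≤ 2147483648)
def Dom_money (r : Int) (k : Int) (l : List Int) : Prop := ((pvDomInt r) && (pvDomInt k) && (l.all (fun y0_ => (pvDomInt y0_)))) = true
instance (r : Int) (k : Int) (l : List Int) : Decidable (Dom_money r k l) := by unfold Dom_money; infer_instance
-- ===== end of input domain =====

-- B replaces A's per-ride list mutation (pop(0)/append) by a front-offset with modular
-- indexing plus cycle detection over the offsets, so the r rides are settled without
-- simulating each one; the equivalence proved is about the RETURN value only (A rotates
-- its list argument in place, B does not mutate it).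

-- ===== PORT A =====
-- the inner 'while len(l)' loop: state (l, tmps, s, tmpl); returns (s, remaining l, tmpl)
def innerA (k : Int) : List Int → Int → Int → List Int → Int × List Int × List Int
  | [], _, s, tmpl => (s, [], tmpl)
  | x :: rest, tmps, s, tmpl =>
    if tmps + x > k then (s, x :: rest, tmpl)
    else innerA k rest (tmps + x) (s + x) (tmpl ++ [x])

-- the outer 'for i in range(r)' loop (range(r) is empty for r ≤ 0)
def outerA (k : Int) : Nat → Int → List Int → Int
  | 0, s, _ => s
  | m + 1, s, l =>
    let p := innerA k l 0 s []
    outerA k m p.1 (p.2.1 ++ p.2.2)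

def money (r : Int) (k : Int) (l : List Int) : String :=
  PySem.Int.toStr (outerA k r.toNat 0 l)

-- ===== PORT B =====
-- the 'while t < n and e + l[(o+t)%n] <= k' loop of ride(o); fuel n.toNat suffices
def rideLoop (k : Int) (l : List Int) (n o : Int) : Nat → Int → Int → Int × Int
  | 0, e, t => (e, PySem.Int.mod (o + t) n)
  | f + 1, e, t =>
    if t < n then
      match PySem.List.pyGet? l (PySem.Int.mod (o + t) n) with
      | some x =>
        if e + x ≤ k then rideLoop k l n o f (e + x) (t + 1)
        else (e, PySem.Int.mod (o + t) n)
      | none => (e, PySem.Int.mod (o + t) n)   -- unreachable: 0 ≤ (o+t)%n < n = len l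
    else (e, PySem.Int.mod (o + t) n)

def rideB (k : Int) (l : List Int) (n o : Int) : Int × Int :=
  rideLoop k l n o n.toNat 0 0

-- 'while i < r and o not in seen' : state (seen, o, total, i)
def phase1 (k : Int) (l : List Int) (n r : Int) :
    Nat → PySem.Dict Int (Int × Int) → Int → Int → Int →
    PySem.Dict Int (Int × Int) × Int × Int × Int
  | 0, seen, o, total, i => (seen, o, total, i)
  | f + 1, seen, o, total, i =>
    if i < r ∧ PySem.Dict.get? seen o = none then
      let seen' := PySem.Dict.insert seen o (i, total)
      let p := rideB k l n o
      phase1 k l n r f seen' p.2 (total + p.1) (i + 1)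
    else (seen, o, total, i)

-- 'for _ in range(rem)'
def phase3 (k : Int) (l : List Int) (n : Int) : Nat → Int → Int → Int
  | 0, _, total => total
  | f + 1, o, total =>
    let p := rideB k l n o
    phase3 k l n f p.2 (total + p.1)

def money_alt (r : Int) (k : Int) (l : List Int) : String :=
  let n : Int := l.length
  if n = 0 ∨ r ≤ 0 then PySem.Int.toStr 0
  else
    let res := phase1 k l n r r.toNat PySem.Dict.empty 0 0 0
    if res.2.2.2 < r then
      match PySem.Dict.get? res.1 res.2.1 with
      | some jt =>
        let c := res.2.2.2 - jt.1
        let q := PySem.Int.floordiv (r - res.2.2.2) c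
        let rem := PySem.Int.mod (r - res.2.2.2) c
        PySem.Int.toStr (phase3 k l n rem.toNat res.2.1 (res.2.2.1 + q * (res.2.2.1 - jt.2)))
      | none => PySem.Int.toStr res.2.2.1   -- unreachable: the loop exited on 'o in seen'
    else PySem.Int.toStr res.2.2.1

-- ===== PRECONDITION & SPEC =====
def Spec_money (r : Int) (k : Int) (l : List Int) (out : String) : Prop := out = money_alt r k l
instance (r : Int) (k : Int) (l : List Int) (out : String) : Decidable (Spec_money r k l out) := by unfold Spec_money; infer_instance

-- ===== CLAIM (what is proved, stated in full; the proofs are below) =====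
def Claim_equal_money : Prop := ∀ (r : Int) (k : Int) (l : List Int), Dom_money r k l → Spec_money r k l (money r k l)

-- ===== LEMMAS AND PROOFS =====

-- greedy characterisation of one ride on a list: (#groups taken, earnings)
def gtake (k : Int) : List Int → Int → Nat × Int
  | [], _ => (0, 0)
  | x :: rest, e =>
    if e + x ≤ k then
      let p := gtake k rest (e + x)
      (p.1 + 1, p.2 + x)
    else (0, 0)

theorem gtake_le_length (k : Int) (xs : List Int) (e : Int) : (gtake k xs e).1 ≤ xs.length := by
  induction xs generalizing e with
  | nil => simp [gtake]
  | cons x rest ih =>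
    simp only [gtake]
    split
    · simpa using Nat.succ_le_succ (ih (e + x))
    · simp

theorem innerA_eq (k : Int) (xs : List Int) (e s : Int) (acc : List Int) :
    innerA k xs e s acc =
      (s + (gtake k xs e).2, xs.drop (gtake k xs e).1, acc ++ xs.take (gtake k xs e).1) := by
  induction xs generalizing e s acc with
  | nil => simp [innerA, gtake]
  | cons x rest ih =>
    simp only [innerA, gtake]
    by_cases h : e + x ≤ k
    · rw [if_neg (by omega), if_pos h, ih]
      refine Prod.ext (by simp; ring) (Prod.ext (by simp) (by simp))
    · rw [if_pos (by omega), if_neg h]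
      simp

-- per-offset ride data (k l fixed): count taken, earnings, next offset
def cnt (k : Int) (l : List Int) (o : Nat) : Nat := (gtake k (l.rotate o) 0).1
def ern (k : Int) (l : List Int) (o : Nat) : Int := (gtake k (l.rotate o) 0).2
def nxt (k : Int) (l : List Int) (o : Nat) : Nat := (o + cnt k l o) % l.length

theorem nxt_lt (k : Int) (l : List Int) (hl : l ≠ []) (o : Nat) : nxt k l o < l.length :=
  Nat.mod_lt _ (List.length_pos_of_ne_nil hl)

theorem rideLoop_eq (k : Int) (l : List Int) (o : Nat) (ho : o < l.length) :
    ∀ (fuel t : Nat) (e : Int), t ≤ l.length → l.length - t ≤ fuel →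
      rideLoop k l (l.length : Int) (o : Int) fuel e (t : Int) =
        (e + (gtake k ((l.rotate o).drop t) e).2,
         (((o + t + (gtake k ((l.rotate o).drop t) e).1) % l.length : Nat) : Int)) := by
  intro fuel
  induction fuel with
  | zero =>
    intro t e ht hf
    have htn : t = l.length := by omega
    subst htn
    have hdrop : (l.rotate o).drop l.length = [] := by
      rw [List.drop_eq_nil_iff]; simp
    rw [rideLoop, hdrop]
    simp only [gtake, Prod.mk.injEq]
    constructor
    · ring_nf
    · rw [show (o : Int) + (l.length : Int) = ((o + l.length : Nat) : Int) from by push_cast; ring]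
      rw [PySem.Int.mod_natCast]
      norm_num
  | succ f ih =>
    intro t e ht hf
    rw [rideLoop]
    by_cases htlt : t < l.length
    · rw [if_pos (by exact_mod_cast htlt)]
      have hmodcast : PySem.Int.mod ((o : Int) + (t : Int)) (l.length : Int)
          = (((o + t) % l.length : Nat) : Int) := by
        rw [show (o : Int) + (t : Int) = ((o + t : Nat) : Int) from by push_cast; ring]
        exact PySem.Int.mod_natCast _ _
      have hidx : ((o + t) % l.length) < l.length := Nat.mod_lt _ (by omega)
      have hrot : (l.rotate o)[t]'(by simpa using htlt) = l[(o + t) % l.length]'hidx := by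
        simp only [List.getElem_rotate, Nat.add_comm t o]
      have hget : PySem.List.pyGet? l (PySem.Int.mod ((o : Int) + (t : Int)) (l.length : Int))
          = some ((l.rotate o)[t]'(by simpa using htlt)) := by
        rw [hmodcast, PySem.List.pyGet?_natCast, hrot]
        simp [List.getElem?_eq_getElem hidx]
      rw [hget]
      dsimp only
      have hdrop : (l.rotate o).drop t
          = (l.rotate o)[t]'(by simpa using htlt) :: (l.rotate o).drop (t + 1) :=
        List.drop_eq_getElem_cons (by simpa using htlt)
      set x := (l.rotate o)[t]'(by simpa using htlt) with hx
      by_cases hek : e + x ≤ k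
      · rw [if_pos hek]
        have hrec := ih (t + 1) (e + x) (by omega) (by omega)
        rw [show ((t : Int) + 1) = ((t + 1 : Nat) : Int) from by push_cast; ring]
        rw [hrec, hdrop]
        simp only [gtake, if_pos hek, Prod.mk.injEq]
        constructor
        · ring_nf
        · congr 2
          omega
      · rw [if_neg hek, hdrop]
        simp only [gtake, if_neg hek, Prod.mk.injEq]
        constructor
        · ring_nf
        · rw [hmodcast]
          norm_num
    · rw [if_neg (by exact_mod_cast htlt)]
      have htn : t = l.length := by omega
      subst htn
      have hdrop : (l.rotate o).drop l.length = [] := by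
        rw [List.drop_eq_nil_iff]; simp
      rw [hdrop]
      simp only [gtake, Prod.mk.injEq]
      constructor
      · ring_nf
      · rw [show (o : Int) + (l.length : Int) = ((o + l.length : Nat) : Int) from by push_cast; ring]
        rw [PySem.Int.mod_natCast]
        norm_num

theorem rideB_eq (k : Int) (l : List Int) (o : Nat) (ho : o < l.length) :
    rideB k l (l.length : Int) (o : Int) = (ern k l o, ((nxt k l o : Nat) : Int)) := by
  have h := rideLoop_eq k l o ho l.length 0 0 (Nat.zero_le _) (by omega)
  simp only [Nat.cast_zero] at h
  rw [rideB, Int.toNat_natCast, h]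
  simp [ern, nxt, cnt]

-- earnings/offset after m rides starting at offset o
def runN (k : Int) (l : List Int) : Nat → Nat → Int × Nat
  | 0, o => (0, o)
  | m + 1, o =>
    let p := runN k l m (nxt k l o)
    (ern k l o + p.1, p.2)

theorem runN_lt (k : Int) (l : List Int) (hl : l ≠ []) :
    ∀ (m : Nat) (o : Nat), o < l.length → (runN k l m o).2 < l.length := by
  intro m
  induction m with
  | zero => intro o ho; simpa [runN] using ho
  | succ m ih => intro o ho; simpa [runN] using ih (nxt k l o) (nxt_lt k l hl o)

theorem runN_add (k : Int) (l : List Int) (a b : Nat) (o : Nat) :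
    runN k l (a + b) o =
      ((runN k l a o).1 + (runN k l b (runN k l a o).2).1, (runN k l b (runN k l a o).2).2) := by
  induction a generalizing o with
  | zero => simp [runN]
  | succ a ih =>
    rw [show a + 1 + b = (a + b) + 1 from by omega]
    simp only [runN, ih (nxt k l o)]
    exact Prod.ext (by simp; ring) (by simp)

theorem runN_succ_right (k : Int) (l : List Int) (m o : Nat) :
    runN k l (m + 1) o =
      ((runN k l m o).1 + ern k l (runN k l m o).2, nxt k l (runN k l m o).2) := by
  rw [runN_add k l m 1 o]
  simp [runN]

theorem outerA_nil (k : Int) : ∀ (m : Nat) (s : Int), outerA k m s [] = s := by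
  intro m
  induction m with
  | zero => intro s; rfl
  | succ m ih => intro s; simpa [outerA, innerA] using ih s

theorem outerA_runs (k : Int) (l : List Int) (hl : l ≠ []) :
    ∀ (m : Nat) (s : Int) (o : Nat), o < l.length →
      outerA k m s (l.rotate o) = s + (runN k l m o).1 := by
  intro m
  induction m with
  | zero => intro s o ho; simp [outerA, runN]
  | succ m ih =>
    intro s o ho
    rw [outerA]
    simp only [innerA_eq]
    have hcnt : cnt k l o ≤ (l.rotate o).length := by
      simpa [cnt] using gtake_le_length k (l.rotate o) 0
    have hlist : (l.rotate o).drop (gtake k (l.rotate o) 0).1 ++ (l.rotate o).take (gtake k (l.rotate o) 0).1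
        = l.rotate (nxt k l o) := by
      rw [show (gtake k (l.rotate o) 0).1 = cnt k l o from rfl]
      rw [← List.rotate_eq_drop_append_take (by simpa using hcnt)]
      rw [List.rotate_rotate, nxt, List.rotate_mod]
    simp only [List.nil_append]
    rw [hlist, ih _ (nxt k l o) (nxt_lt k l hl o)]
    simp only [runN]
    rw [show (gtake k (l.rotate o) 0).2 = ern k l o from rfl]
    ring

theorem phase3_runs (k : Int) (l : List Int) (hl : l ≠ []) :
    ∀ (fuel : Nat) (o : Nat) (total : Int), o < l.length →
      phase3 k l (l.length : Int) fuel ((o : Nat) : Int) total = total + (runN k l fuel o).1 := by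
  intro fuel
  induction fuel with
  | zero => intro o total ho; simp [phase3, runN]
  | succ f ih =>
    intro o total ho
    rw [phase3]
    simp only [rideB_eq k l o ho]
    rw [ih (nxt k l o) _ (nxt_lt k l hl o)]
    simp only [runN]
    ring

-- the orbit from offset 0
def orb (k : Int) (l : List Int) (m : Nat) : Nat := (runN k l m 0).2
def tot (k : Int) (l : List Int) (m : Nat) : Int := (runN k l m 0).1

theorem orb_lt (k : Int) (l : List Int) (hl : l ≠ []) (m : Nat) : orb k l m < l.length :=
  runN_lt k l hl m 0 (List.length_pos_of_ne_nil hl)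

theorem runN_cycle (k : Int) (l : List Int) (j m : Nat) (hjm : j ≤ m)
    (hcyc : orb k l m = orb k l j) :
    runN k l (m - j) (orb k l j) = (tot k l m - tot k l j, orb k l j) := by
  have h := runN_add k l j (m - j) 0
  rw [show j + (m - j) = m from by omega] at h
  have h1 : tot k l m = tot k l j + (runN k l (m - j) (orb k l j)).1 := by
    simpa [tot, orb] using congrArg Prod.fst h
  have h2 : orb k l m = (runN k l (m - j) (orb k l j)).2 := by
    simpa [orb] using congrArg Prod.snd h
  have h3 := h2.symm.trans hcyc
  exact Prod.ext (by omega) h3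

theorem runN_cycle_mul (k : Int) (l : List Int) (c : Nat) (o : Nat) (ce : Int)
    (h : runN k l c o = (ce, o)) :
    ∀ q : Nat, runN k l (q * c) o = ((q : Int) * ce, o) := by
  intro q
  induction q with
  | zero => simp [runN]
  | succ q ih =>
    rw [show (q + 1) * c = q * c + c from by ring]
    rw [runN_add, ih, h]
    simp
    ring

-- phase1 invariant and exit characterisation
theorem phase1_spec (k : Int) (l : List Int) (hl : l ≠ []) (r : Int) :
    ∀ (f : Nat) (seen : PySem.Dict Int (Int × Int)) (m : Nat),
      f + m = r.toNat →
      (∀ key val, PySem.Dict.get? seen key = some val →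
        ∃ j : Nat, j < m ∧ ((orb k l j : Nat) : Int) = key ∧ val = ((j : Int), tot k l j)) →
      ∃ (m' : Nat) (seen' : PySem.Dict Int (Int × Int)),
        phase1 k l (l.length : Int) r f seen ((orb k l m : Nat) : Int) (tot k l m) (m : Int)
          = (seen', ((orb k l m' : Nat) : Int), tot k l m', (m' : Int)) ∧
        m ≤ m' ∧ m' ≤ r.toNat ∧
        ((m' : Int) < r →
          ∃ j : Nat, j < m' ∧ orb k l j = orb k l m' ∧
            PySem.Dict.get? seen' ((orb k l m' : Nat) : Int) = some ((j : Int), tot k l j)) := by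
  intro f
  induction f with
  | zero =>
    intro seen m hfm hinv
    refine ⟨m, seen, rfl, le_refl _, by omega, ?_⟩
    intro hlt
    omega
  | succ f ih =>
    intro seen m hfm hinv
    rw [phase1]
    by_cases hc : (m : Int) < r ∧ PySem.Dict.get? seen ((orb k l m : Nat) : Int) = none
    · rw [if_pos hc]
      simp only [rideB_eq k l (orb k l m) (orb_lt k l hl m)]
      have hstep1 : (nxt k l (orb k l m)) = orb k l (m + 1) := by
        show _ = (runN k l (m + 1) 0).2
        rw [runN_succ_right]
        rfl
      have hstep2 : tot k l m + ern k l (orb k l m) = tot k l (m + 1) := by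
        show _ = (runN k l (m + 1) 0).1
        rw [runN_succ_right]
        rfl
      have hinv' : ∀ key val,
          PySem.Dict.get? (PySem.Dict.insert seen ((orb k l m : Nat) : Int) ((m : Int), tot k l m)) key = some val →
          ∃ j : Nat, j < m + 1 ∧ ((orb k l j : Nat) : Int) = key ∧ val = ((j : Int), tot k l j) := by
        intro key val hget
        rw [PySem.Dict.get?_insert] at hget
        by_cases hkey : key = ((orb k l m : Nat) : Int)
        · rw [if_pos hkey] at hget
          exact ⟨m, by omega, hkey.symm, (Option.some_inj.mp hget).symm⟩
        · rw [if_neg hkey] at hget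
          obtain ⟨j, hj, hkj, hvj⟩ := hinv key val hget
          exact ⟨j, by omega, hkj, hvj⟩
      have hrec := ih _ (m + 1) (by omega) hinv'
      rw [hstep1, hstep2]
      rw [show ((m : Int) + 1) = ((m + 1 : Nat) : Int) from by push_cast; ring]
      obtain ⟨m', seen', heq, hm1, hm2, hexit⟩ := hrec
      exact ⟨m', seen', heq, by omega, hm2, hexit⟩
    · rw [if_neg hc]
      refine ⟨m, seen, rfl, le_refl _, by omega, ?_⟩
      intro hlt
      have hsome : PySem.Dict.get? seen ((orb k l m : Nat) : Int) ≠ none := by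
        intro h; exact hc ⟨hlt, h⟩
      obtain ⟨val, hval⟩ := Option.ne_none_iff_exists'.mp hsome
      obtain ⟨j, hj, hkj, hvj⟩ := hinv _ val hval
      have hjj : orb k l j = orb k l m := by exact_mod_cast hkj
      exact ⟨j, hj, hjj, by rw [hval, hvj]⟩

-- ===== VERDICT (by name: the statement is the Claim_ definition above) =====
theorem money_spec : Claim_equal_money := by
  intro r k l _dom
  unfold Spec_money money money_alt
  by_cases hl : l = []
  · subst hl
    simp [outerA_nil]
  by_cases hr : r ≤ 0
  · have hz : r.toNat = 0 := by omega
    rw [hz]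
    rw [if_pos (Or.inr hr)]
    rfl
  · push_neg at hr
    rw [if_neg (by push_neg; exact ⟨by simpa using hl, by omega⟩)]
    have hA : outerA k r.toNat 0 l = tot k l r.toNat := by
      have h := outerA_runs k l hl r.toNat 0 0 (List.length_pos_of_ne_nil hl)
      simpa [tot, List.rotate_zero] using h
    rw [hA]
    obtain ⟨m', seen', heq, _, hm2, hexit⟩ :=
      phase1_spec k l hl r r.toNat PySem.Dict.empty 0 (by omega)
        (by intro key val h; simp [PySem.Dict.get?_empty] at h)
    rw [show ((orb k l 0 : Nat) : Int) = 0 from by simp [orb, runN],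
        show tot k l 0 = 0 from rfl, show ((0 : Nat) : Int) = 0 from rfl] at heq
    rw [heq]
    by_cases hlt : (m' : Int) < r
    · simp only [if_pos hlt]
      obtain ⟨j, hj, hjorb, hget⟩ := hexit hlt
      rw [hget]
      dsimp only
      have hcyc : runN k l (m' - j) (orb k l m') = (tot k l m' - tot k l j, orb k l m') := by
        have h := runN_cycle k l j m' (by omega) hjorb.symm
        rwa [hjorb] at h
      set D : Nat := r.toNat - m' with hD
      set cN : Nat := m' - j with hcN
      have hcpos : 0 < cN := by omega
      have hcast1 : (m' : Int) - (j : Int) = ((cN : Nat) : Int) := by rw [hcN]; omega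
      have hcast2 : r - (m' : Int) = ((D : Nat) : Int) := by
        rw [hD, Nat.cast_sub hm2, Int.toNat_of_nonneg (le_of_lt hr)]
      rw [hcast1, hcast2, PySem.Int.floordiv_natCast, PySem.Int.mod_natCast, Int.toNat_natCast]
      rw [phase3_runs k l hl (D % cN) (orb k l m') _ (orb_lt k l hl m')]
      have hsplit : runN k l D (orb k l m') =
          (((D / cN : Nat) : Int) * (tot k l m' - tot k l j) + (runN k l (D % cN) (orb k l m')).1,
           (runN k l (D % cN) (orb k l m')).2) := by
        conv_lhs => rw [show D = (D / cN) * cN + D % cN from by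
          rw [Nat.mul_comm]; exact (Nat.div_add_mod D cN).symm]
        rw [runN_add, runN_cycle_mul k l cN (orb k l m') _ hcyc (D / cN)]
      have htotr : tot k l r.toNat = tot k l m' + (runN k l D (orb k l m')).1 := by
        have h := runN_add k l m' D 0
        rw [show m' + D = r.toNat from by omega] at h
        simpa [tot, orb] using congrArg Prod.fst h
      rw [htotr, hsplit]
      congr 1
      push_cast
      ring
    · simp only [if_neg hlt]
      have hm : m' = r.toNat := by omega
      rw [hm]
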